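-- pv_equiv track=rewrite | github.com/Hrishik0018/AI-TimeTable-Generator | src/updater_ai.py | _find_teacher_by_id_or_name
-- ===== SOURCE A (Python) =====
-- def _find_teacher_by_id_or_name(teachers, token):
--     t_low = token.strip().lower()
--     for t in teachers:
--         if t.get("teacher_id","").lower() == t_low:
--             return t
--     for t in teachers:
--         if token.strip().lower() in t.get("teacher_name","").lower():
--             return t
--     return None
-- ===== SOURCE B (Python) =====
-- def _find_teacher_by_id_or_name(teachers, token):
--     t_low = token.strip().lower()
--     cands = []
--     for t in teachers:
--         if t.get("teacher_id", "").lower() == t_low: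
--             cands.append((0, t))
--         elif t_low in t.get("teacher_name", "").lower():
--             cands.append((1, t))
--     return min(cands, key=lambda c: c[0])[1] if cands else None
-- ===== Notes on version B (the rewrite author's own statement) =====
-- stated objective: alternative
-- what changed: Rank-and-select instead of two staged scans: one pass collects (rank, teacher) candidates (rank 0 for an ID match, 1 for a name-substring match) and the answer is the first minimal-rank candidate via Python's stable min, which preserves A's priority (ID beats name, first hit wins); the token is normalized once instead of per element.
import Mathlib
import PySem

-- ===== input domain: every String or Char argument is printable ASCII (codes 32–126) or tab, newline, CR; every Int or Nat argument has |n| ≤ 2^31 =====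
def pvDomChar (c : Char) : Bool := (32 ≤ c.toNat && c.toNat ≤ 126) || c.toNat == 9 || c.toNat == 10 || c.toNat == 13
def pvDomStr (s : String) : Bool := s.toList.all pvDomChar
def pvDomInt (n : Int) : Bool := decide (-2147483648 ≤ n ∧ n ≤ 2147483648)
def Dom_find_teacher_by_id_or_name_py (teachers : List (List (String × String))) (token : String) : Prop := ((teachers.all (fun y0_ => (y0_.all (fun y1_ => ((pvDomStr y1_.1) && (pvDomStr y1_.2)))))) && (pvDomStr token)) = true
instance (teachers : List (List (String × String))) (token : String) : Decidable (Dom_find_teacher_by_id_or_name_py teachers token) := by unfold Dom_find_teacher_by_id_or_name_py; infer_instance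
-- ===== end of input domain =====

-- B replaces A's two staged scans by rank-and-select: one pass collects (rank, teacher) candidates (0 = ID match, 1 = name-substring match) and the answer is the first minimal-rank candidate.

-- ===== PORT A =====
-- first loop: return t on t.get("teacher_id","").lower() == t_low
def pvAIdLoop (tLow : String) : List (List (String × String)) → Option (List (String × String))
  | [] => none
  | t :: rest =>
    if PySem.Str.lower ((PySem.Dict.mk t).getD "teacher_id" "") == tLow then some t
    else pvAIdLoop tLow rest

-- second loop: return t on token.strip().lower() in t.get("teacher_name","").lower() (token renormalized each iteration, as in A)
def pvANameLoop (token : String) : List (List (String × String)) → Option (List (String × String))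
  | [] => none
  | t :: rest =>
    if PySem.Str.isIn (PySem.Str.lower (PySem.Str.strip token)) (PySem.Str.lower ((PySem.Dict.mk t).getD "teacher_name" "")) then some t
    else pvANameLoop token rest

def find_teacher_by_id_or_name_py (teachers : List (List (String × String))) (token : String) : Option (List (String × String)) :=
  let tLow := PySem.Str.lower (PySem.Str.strip token)
  match pvAIdLoop tLow teachers with
  | some t => some t
  | none => pvANameLoop token teachers

-- ===== PORT B =====
-- the candidate-building loop of Source B: (0, t) for an ID match, (1, t) for a name-substring match
def pvBCands (tLow : String) : List (List (String × String)) → List (Int × List (String × String))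
  | [] => []
  | t :: rest =>
    if PySem.Str.lower ((PySem.Dict.mk t).getD "teacher_id" "") == tLow then (0, t) :: pvBCands tLow rest
    else if PySem.Str.isIn tLow (PySem.Str.lower ((PySem.Dict.mk t).getD "teacher_name" "")) then (1, t) :: pvBCands tLow rest
    else pvBCands tLow rest

-- min(cands, key=lambda c: c[0])[1] if cands else None  (PySem.List.min? is none exactly on [])
def find_teacher_by_id_or_name_py_alt (teachers : List (List (String × String))) (token : String) : Option (List (String × String)) :=
  let tLow := PySem.Str.lower (PySem.Str.strip token)
  (PySem.List.min? (pvBCands tLow teachers) (fun c => c.1)).map (fun c => c.2)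

-- ===== PRECONDITION & SPEC =====
def Spec_find_teacher_by_id_or_name_py (teachers : List (List (String × String))) (token : String) (out : Option (List (String × String))) : Prop := out = find_teacher_by_id_or_name_py_alt teachers token
instance (teachers : List (List (String × String))) (token : String) (out : Option (List (String × String))) : Decidable (Spec_find_teacher_by_id_or_name_py teachers token out) := by unfold Spec_find_teacher_by_id_or_name_py; infer_instance

-- ===== CLAIM (what is proved, stated in full; the proofs are below) =====
def Claim_equal_find_teacher_by_id_or_name_py : Prop := ∀ (teachers : List (List (String × String))) (token : String), Dom_find_teacher_by_id_or_name_py teachers token → Spec_find_teacher_by_id_or_name_py teachers token (find_teacher_by_id_or_name_py teachers token)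

-- ===== LEMMAS AND PROOFS =====
-- proof-side view of A's second loop with the token normalized once
def pvBNameLoop (tLow : String) : List (List (String × String)) → Option (List (String × String))
  | [] => none
  | t :: rest =>
    if PySem.Str.isIn tLow (PySem.Str.lower ((PySem.Dict.mk t).getD "teacher_name" "")) then some t
    else pvBNameLoop tLow rest

-- A's second loop renormalizes the token each iteration; that equals using the precomputed tLow.
theorem pvANameLoop_eq (token : String) (l : List (List (String × String))) :
    pvANameLoop token l = pvBNameLoop (PySem.Str.lower (PySem.Str.strip token)) l := by
  induction l with
  | nil => rfl
  | cons t rest ih => simp [pvANameLoop, pvBNameLoop, ih]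

-- the step function of PySem.List.min? with key c.1
def pvStep (acc : Option (Int × List (String × String))) (c : Int × List (String × String)) : Option (Int × List (String × String)) :=
  match acc with
  | none => some c
  | some m => if c.1 < m.1 then some c else some m

theorem pvMin?_eq_foldl (L : List (Int × List (String × String))) :
    PySem.List.min? L (fun c => c.1) = L.foldl pvStep none := by
  unfold PySem.List.min?
  congr 1
  funext acc c
  cases acc <;> rfl

-- every candidate rank is 0 or 1
theorem pvBCands_rank (tLow : String) (l : List (List (String × String))) :
    ∀ c ∈ pvBCands tLow l, c.1 = 0 ∨ c.1 = 1 := by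
  induction l with
  | nil => intro c h; simp [pvBCands] at h
  | cons t rest ih =>
    intro c h
    simp only [pvBCands] at h
    split at h
    · rcases List.mem_cons.1 h with h | h
      · left; simp [h]
      · exact ih c h
    · split at h
      · rcases List.mem_cons.1 h with h | h
        · right; simp [h]
        · exact ih c h
      · exact ih c h

-- a rank-0 accumulator survives the whole min fold
theorem pvFold_zero (t : List (String × String)) (L : List (Int × List (String × String)))
    (h : ∀ c ∈ L, c.1 = 0 ∨ c.1 = 1) :
    L.foldl pvStep (some (0, t)) = some (0, t) := by
  induction L with
  | nil => rfl
  | cons c rest ih =>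
    have hc := h c (List.mem_cons_self ..)
    have : pvStep (some (0, t)) c = some (0, t) := by
      rcases hc with h0 | h1 <;> simp [pvStep] <;> omega
    rw [List.foldl_cons, this]
    exact ih (fun c hc => h c (List.mem_cons_of_mem _ hc))

-- with a rank-1 accumulator, the fold returns the first rank-0 candidate, else the accumulator
theorem pvFold_one (t : List (String × String)) (L : List (Int × List (String × String)))
    (h : ∀ c ∈ L, c.1 = 0 ∨ c.1 = 1) :
    L.foldl pvStep (some (1, t)) =
      match L.find? (fun c => c.1 == 0) with
      | some c => some c
      | none => some (1, t) := by
  induction L with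
  | nil => rfl
  | cons c rest ih =>
    have hrest : ∀ c ∈ rest, c.1 = 0 ∨ c.1 = 1 := fun c hc => h c (List.mem_cons_of_mem _ hc)
    rcases h c (List.mem_cons_self ..) with h0 | h1
    · have hs : pvStep (some (1, t)) c = some c := by simp [pvStep]; omega
      rw [List.foldl_cons, hs]
      obtain ⟨r, u⟩ := c
      simp only at h0; subst h0
      rw [pvFold_zero u rest hrest]
      simp [List.find?]
    · have hs : pvStep (some (1, t)) c = some (1, t) := by simp [pvStep]; omega
      rw [List.foldl_cons, hs, ih hrest]
      have : (c.1 == 0) = false := by simp [h1]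
      simp [List.find?, this]

-- the first rank-0 candidate is exactly A's first ID match
theorem pvBCands_find0 (tLow : String) (l : List (List (String × String))) :
    (pvBCands tLow l).find? (fun c => c.1 == 0) = (pvAIdLoop tLow l).map (fun u => ((0 : Int), u)) := by
  induction l with
  | nil => rfl
  | cons t rest ih =>
    simp only [pvBCands, pvAIdLoop]
    split
    · simp [List.find?]
    · split
      · simpa [List.find?] using ih
      · exact ih

-- the minimal-rank candidate is A's result: first ID match (rank 0), else first name match (rank 1)
theorem pvMin_cands (tLow : String) (l : List (List (String × String))) :
    PySem.List.min? (pvBCands tLow l) (fun c => c.1) =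
      match pvAIdLoop tLow l with
      | some t => some ((0 : Int), t)
      | none => (pvBNameLoop tLow l).map (fun t => ((1 : Int), t)) := by
  induction l with
  | nil => rfl
  | cons t rest ih =>
    have hrank := pvBCands_rank tLow rest
    by_cases hid : (PySem.Str.lower ((PySem.Dict.mk t).getD "teacher_id" "") == tLow) = true
    · have e : pvBCands tLow (t :: rest) = (0, t) :: pvBCands tLow rest := by
        unfold pvBCands; rw [if_pos hid]; exact congrArg _ (pvBCands.eq_def tLow rest)
      have ea : pvAIdLoop tLow (t :: rest) = some t := by
        unfold pvAIdLoop; rw [if_pos hid]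
      rw [e, pvMin?_eq_foldl, List.foldl_cons,
          show pvStep none (0, t) = some (0, t) from rfl, pvFold_zero t _ hrank, ea]
    · have ea : pvAIdLoop tLow (t :: rest) = pvAIdLoop tLow rest := by
        unfold pvAIdLoop; rw [if_neg hid]; exact pvAIdLoop.eq_def tLow rest
      by_cases hnm : (PySem.Str.isIn tLow (PySem.Str.lower ((PySem.Dict.mk t).getD "teacher_name" ""))) = true
      · have e : pvBCands tLow (t :: rest) = (1, t) :: pvBCands tLow rest := by
          unfold pvBCands; rw [if_neg hid, if_pos hnm]; exact congrArg _ (pvBCands.eq_def tLow rest)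
        have en : pvBNameLoop tLow (t :: rest) = some t := by
          unfold pvBNameLoop; rw [if_pos hnm]
        rw [e, pvMin?_eq_foldl, List.foldl_cons,
            show pvStep none (1, t) = some (1, t) from rfl, pvFold_one t _ hrank,
            pvBCands_find0 tLow rest, ea, en]
        cases pvAIdLoop tLow rest <;> rfl
      · have e : pvBCands tLow (t :: rest) = pvBCands tLow rest := by
          unfold pvBCands; rw [if_neg hid, if_neg hnm]; exact pvBCands.eq_def tLow rest
        have en : pvBNameLoop tLow (t :: rest) = pvBNameLoop tLow rest := by
          unfold pvBNameLoop; rw [if_neg hnm]; exact pvBNameLoop.eq_def tLow rest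
        rw [e, ih, ea, en]

-- ===== VERDICT (by name: the statement is the Claim_ definition above) =====
theorem find_teacher_by_id_or_name_py_spec : Claim_equal_find_teacher_by_id_or_name_py := by
  intro teachers token _
  unfold Spec_find_teacher_by_id_or_name_py find_teacher_by_id_or_name_py find_teacher_by_id_or_name_py_alt
  dsimp only
  rw [pvMin_cands, pvANameLoop_eq]
  cases pvAIdLoop (PySem.Str.lower (PySem.Str.strip token)) teachers with
  | some t => rfl
  | none => cases pvBNameLoop (PySem.Str.lower (PySem.Str.strip token)) teachers <;> rfl
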